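-- pv_equiv track=rewrite | github.com/broepke/UCSanDiegoX | Prob-and-Stats/Topic2-Sets/sets.py | union_of_products
-- ===== SOURCE A (Python) =====
-- from itertools import product
--
-- def union_of_products(A, B, S, T):
--     # inputs: A, B, S and T are sets
--     # output: a tuple of the type (set, set)
--
--     AxS = set()
--     AxT = set()
--     BxS = set()
--     BxT = set()
--     final_set = set()
--     final_tuple = ()
--
--     for i in product(A, S):
--         AxS.add(i)
--
--     for i in product(A, T):
--         AxT.add(i)
--
--     for i in product(B, S):
--         BxS.add(i)
--
--     for i in product(B, T):
--         BxT.add(i)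
--
--     # Final AxS | AxT | BxS | BxT
--     final_set = AxS
--     final_set = final_set.union(AxT)
--     final_set = final_set.union(BxS)
--     final_set = final_set.union(BxT)
--
--     final_tuple = (AxS, final_set)
--
--     return final_tuple
-- ===== SOURCE B (Python) =====
-- def union_of_products(A, B, S, T):
--     # inputs: A, B, S and T are sets
--     # output: a tuple of the type (set, set)
--     # Different strategy: remove the overlaps FIRST.  With B_new = B - A and
--     # T_new = T - S the four products become pairwise disjoint, and
--     # AxS | AxT | BxS | BxT = AxS  +  A x T_new  +  B_new x S  +  B_new x T_new
--     # is a disjoint decomposition: the union is assembled without ever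
--     # inserting a pair twice.
--     B_new = [b for b in B if b not in A]
--     T_new = [t for t in T if t not in S]
--     AxS = {(a, s) for a in A for s in S}
--     final_set = (AxS
--                  | {(a, t) for a in A for t in T_new}
--                  | {(b, s) for b in B_new for s in S}
--                  | {(b, t) for b in B_new for t in T_new})
--     return (AxS, final_set)
-- ===== Notes on version B (the rewrite author's own statement) =====
-- stated objective: alternative
-- what changed: Instead of materialising all four full Cartesian products and letting three unions absorb the overlaps, B first computes the set differences B-A and T-S, which makes the four product blocks pairwise disjoint, and assembles the union as this disjoint decomposition AxS + Ax(T-S) + (B-A)xS + (B-A)x(T-S), never generating an overlapping pair.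
import Mathlib
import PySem

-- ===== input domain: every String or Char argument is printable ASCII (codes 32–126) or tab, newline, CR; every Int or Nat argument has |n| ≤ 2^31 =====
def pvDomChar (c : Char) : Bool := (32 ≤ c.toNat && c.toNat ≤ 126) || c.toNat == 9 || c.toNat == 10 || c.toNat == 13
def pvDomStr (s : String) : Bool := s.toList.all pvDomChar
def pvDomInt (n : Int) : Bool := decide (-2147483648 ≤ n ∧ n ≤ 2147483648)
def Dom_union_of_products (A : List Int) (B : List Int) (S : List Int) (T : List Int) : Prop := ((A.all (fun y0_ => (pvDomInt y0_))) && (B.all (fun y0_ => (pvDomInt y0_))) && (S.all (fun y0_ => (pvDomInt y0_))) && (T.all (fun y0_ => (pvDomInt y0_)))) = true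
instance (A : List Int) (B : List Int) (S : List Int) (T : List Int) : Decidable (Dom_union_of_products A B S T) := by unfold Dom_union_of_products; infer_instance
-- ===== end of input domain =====

-- B removes the overlaps first (B-A, T-S), turning the four products into pairwise
-- disjoint blocks whose union is a plain disjoint assembly (objective: alternative).

-- ===== PORT A =====
-- itertools.product(X, Y) as a list of pairs
def pyProduct (X Y : List Int) : List (Int × Int) :=
  X.flatMap (fun x => Y.map (fun y => (x, y)))

def union_of_products (A : List Int) (B : List Int) (S : List Int) (T : List Int) : (List (Int × Int)) × (List (Int × Int)) :=
  -- for i in product(A, S): AxS.add(i)   (and likewise for the other three)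
  let AxS : PySem.Set (Int × Int) := (pyProduct A S).foldl PySem.Set.add PySem.Set.empty
  let AxT : PySem.Set (Int × Int) := (pyProduct A T).foldl PySem.Set.add PySem.Set.empty
  let BxS : PySem.Set (Int × Int) := (pyProduct B S).foldl PySem.Set.add PySem.Set.empty
  let BxT : PySem.Set (Int × Int) := (pyProduct B T).foldl PySem.Set.add PySem.Set.empty
  -- final_set = AxS; final_set = final_set.union(AxT); … union(BxS); … union(BxT)
  let final1 := PySem.Set.union AxS AxT
  let final2 := PySem.Set.union final1 BxS
  let final3 := PySem.Set.union final2 BxT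
  (AxS, final3)

-- ===== PORT B =====
def union_of_products_alt (A : List Int) (B : List Int) (S : List Int) (T : List Int) : (List (Int × Int)) × (List (Int × Int)) :=
  -- B_new = [b for b in B if b not in A];  T_new = [t for t in T if t not in S]
  let B_new := B.filter (fun b => !(A.contains b))
  let T_new := T.filter (fun t => !(S.contains t))
  -- AxS = {(a, s) for a in A for s in S}
  let AxS : PySem.Set (Int × Int) := PySem.Set.ofList (A.flatMap (fun a => S.map (fun s => (a, s))))
  -- final_set = AxS | {…A×T_new…} | {…B_new×S…} | {…B_new×T_new…}
  let final_set : PySem.Set (Int × Int) :=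
    PySem.Set.union
      (PySem.Set.union
        (PySem.Set.union AxS (A.flatMap (fun a => T_new.map (fun t => (a, t)))))
        (B_new.flatMap (fun b => S.map (fun s => (b, s)))))
      (B_new.flatMap (fun b => T_new.map (fun t => (b, t))))
  (AxS, final_set)

-- ===== PRECONDITION & SPEC =====
def Spec_union_of_products (A : List Int) (B : List Int) (S : List Int) (T : List Int) (out : (List (Int × Int)) × (List (Int × Int))) : Prop := out = union_of_products_alt A B S T
instance (A : List Int) (B : List Int) (S : List Int) (T : List Int) (out : (List (Int × Int)) × (List (Int × Int))) : Decidable (Spec_union_of_products A B S T out) := by unfold Spec_union_of_products; infer_instance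

-- ===== CLAIM =====
def Claim_equal_union_of_products : Prop := ∀ (A : List Int) (B : List Int) (S : List Int) (T : List Int), Dom_union_of_products A B S T → Spec_union_of_products A B S T (union_of_products A B S T)

-- ===== LEMMAS AND PROOFS =====

theorem mem_set_add_iff {α : Type} [BEq α] [LawfulBEq α] (s : PySem.Set α) (y x : α) :
    x ∈ PySem.Set.add s y ↔ x ∈ s ∨ x = y := by
  simp [PySem.Set.add, PySem.Set.contains]
  split
  · next h => constructor
              · exact Or.inl
              · rintro (h' | rfl)
                · exact h'
                · simpa using h
  · simp

theorem mem_foldl_add_iff {α : Type} [BEq α] [LawfulBEq α] (l : List α) :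
    ∀ (s : PySem.Set α) (x : α), x ∈ List.foldl PySem.Set.add s l ↔ x ∈ s ∨ x ∈ l := by
  induction l with
  | nil => simp
  | cons y l ih =>
      intro s x
      simp only [List.foldl_cons, ih, mem_set_add_iff, List.mem_cons]
      tauto

-- dropping elements already present in the accumulator does not change the fold
theorem foldl_add_filter {α : Type} [BEq α] [LawfulBEq α] (l : List α) (p : α → Bool) :
    ∀ (s : PySem.Set α), (∀ x ∈ l, p x = false → x ∈ s) →
      List.foldl PySem.Set.add s (l.filter p) = List.foldl PySem.Set.add s l := by
  induction l with
  | nil => intro s _; rfl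
  | cons y l ih =>
      intro s h
      by_cases hy : p y = true
      · simp only [List.filter_cons, hy, if_true, List.foldl_cons]
        exact ih _ (fun x hx hpx => ((mem_set_add_iff s y x).2 (Or.inl (h x (List.mem_cons_of_mem y hx) hpx))))
      · have hy' : p y = false := by simpa using hy
        have hys : y ∈ s := h y (List.mem_cons_self ..) hy'
        have hadd : PySem.Set.add s y = s := by
          simp [PySem.Set.add, PySem.Set.contains, hys]
        simp only [List.filter_cons, hy', Bool.false_eq_true, if_false, List.foldl_cons, hadd]
        exact ih s (fun x hx hpx => h x (List.mem_cons_of_mem y hx) hpx)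

-- filtering a product on the second coordinate = product with the filtered right list
theorem product_filter_snd (X Y : List Int) (q : Int → Bool) :
    (X.flatMap (fun x => Y.map (fun y => (x, y)))).filter (fun p => q p.2)
      = X.flatMap (fun x => (Y.filter q).map (fun y => (x, y))) := by
  induction X with
  | nil => rfl
  | cons a X ih => simp [List.flatMap_cons, List.filter_append, ih, List.filter_map, Function.comp_def]

-- filtering a product on the first coordinate = product with the filtered left list
theorem product_filter_fst (X Y : List Int) (q : Int → Bool) :
    (X.flatMap (fun x => Y.map (fun y => (x, y)))).filter (fun p => q p.1)
      = (X.filter q).flatMap (fun x => Y.map (fun y => (x, y))) := by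
  induction X with
  | nil => rfl
  | cons a X ih =>
      by_cases hq : q a = true
      · simp [List.flatMap_cons, List.filter_append, hq, ih, List.filter_map,
              Function.comp_def]
      · have hq' : q a = false := by simpa using hq
        simp [List.flatMap_cons, List.filter_append, hq', ih, List.filter_map,
              Function.comp_def]

-- filtering a product on both coordinates
theorem product_filter_both (X Y : List Int) (q r : Int → Bool) :
    (X.flatMap (fun x => Y.map (fun y => (x, y)))).filter (fun p => q p.1 && r p.2)
      = (X.filter q).flatMap (fun x => (Y.filter r).map (fun y => (x, y))) := by
  induction X with
  | nil => rfl
  | cons a X ih =>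
      by_cases hq : q a = true
      · simp [List.flatMap_cons, List.filter_append, hq, ih, List.filter_map,
              Function.comp_def]
      · have hq' : q a = false := by simpa using hq
        simp [List.flatMap_cons, List.filter_append, hq', ih, List.filter_map,
              Function.comp_def]

-- folding a deduplicated list equals folding the list itself (flattening Set.union)
theorem foldl_add_foldl {α : Type} [BEq α] [LawfulBEq α] (l : List α) :
    ∀ (s u : PySem.Set α),
      List.foldl PySem.Set.add s (List.foldl PySem.Set.add u l)
        = List.foldl PySem.Set.add (List.foldl PySem.Set.add s u) l := by
  induction l with
  | nil => intro s u; rfl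
  | cons x l ih =>
      intro s u
      simp only [List.foldl_cons]
      rw [ih]
      congr 1
      by_cases hx : x ∈ u
      · have hu : PySem.Set.add u x = u := by
          simp [PySem.Set.add, PySem.Set.contains, hx]
        have hs : PySem.Set.add (List.foldl PySem.Set.add s u) x
            = List.foldl PySem.Set.add s u := by
          have : x ∈ List.foldl PySem.Set.add s u := (mem_foldl_add_iff u s x).2 (Or.inr hx)
          simp [PySem.Set.add, PySem.Set.contains, this]
        rw [hu, hs]
      · have hu : PySem.Set.add u x = u ++ [x] := by
          simp [PySem.Set.add, PySem.Set.contains, hx]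
        rw [hu, List.foldl_append]
        rfl

-- ===== VERDICT =====
theorem union_of_products_spec : Claim_equal_union_of_products := by
  intro A B S T _
  show union_of_products A B S T = union_of_products_alt A B S T
  simp only [union_of_products, union_of_products_alt, pyProduct,
    PySem.Set.ofList, PySem.Set.union, PySem.Set.update, PySem.Set.empty]
  refine Prod.ext rfl ?_
  show List.foldl _ (List.foldl _ (List.foldl _ (List.foldl _ [] _) _) _) _ = _
  -- name the four unfiltered blocks
  have e2 : (A.flatMap (fun a => ((T.filter (fun t => !(S.contains t))).map (fun t => (a, t)))))
      = (A.flatMap (fun a => T.map (fun t => (a, t)))).filter (fun p => !(S.contains p.2)) :=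
    (product_filter_snd A T _).symm
  have e3 : ((B.filter (fun b => !(A.contains b))).flatMap (fun b => S.map (fun s => (b, s))))
      = (B.flatMap (fun b => S.map (fun s => (b, s)))).filter (fun p => !(A.contains p.1)) :=
    (product_filter_fst B S _).symm
  have e4 : ((B.filter (fun b => !(A.contains b))).flatMap
        (fun b => ((T.filter (fun t => !(S.contains t))).map (fun t => (b, t)))))
      = (B.flatMap (fun b => T.map (fun t => (b, t)))).filter
          (fun p => !(A.contains p.1) && !(S.contains p.2)) :=
    (product_filter_both B T _ _).symm
  rw [e2, e3, e4]
  -- replace each filtered block by the full block, innermost first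
  have h2 : List.foldl PySem.Set.add (List.foldl PySem.Set.add ([] : PySem.Set (Int × Int))
        (A.flatMap (fun a => S.map (fun s => (a, s)))))
        ((A.flatMap (fun a => T.map (fun t => (a, t)))).filter (fun p => !(S.contains p.2)))
      = List.foldl PySem.Set.add (List.foldl PySem.Set.add []
        (A.flatMap (fun a => S.map (fun s => (a, s)))))
        (A.flatMap (fun a => T.map (fun t => (a, t)))) := by
    apply foldl_add_filter
    intro x hx hpx
    rw [mem_foldl_add_iff]
    right
    simp only [List.mem_flatMap, List.mem_map] at hx ⊢
    obtain ⟨a, ha, t, ht, rfl⟩ := hx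
    simp only [Bool.not_eq_false', List.contains_eq_mem, decide_eq_true_eq] at hpx
    exact ⟨a, ha, t, by simpa using hpx, rfl⟩
  rw [h2]
  have h3 : List.foldl PySem.Set.add
        (List.foldl PySem.Set.add (List.foldl PySem.Set.add ([] : PySem.Set (Int × Int))
          (A.flatMap (fun a => S.map (fun s => (a, s)))))
          (A.flatMap (fun a => T.map (fun t => (a, t)))))
        ((B.flatMap (fun b => S.map (fun s => (b, s)))).filter (fun p => !(A.contains p.1)))
      = List.foldl PySem.Set.add
        (List.foldl PySem.Set.add (List.foldl PySem.Set.add []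
          (A.flatMap (fun a => S.map (fun s => (a, s)))))
          (A.flatMap (fun a => T.map (fun t => (a, t)))))
        (B.flatMap (fun b => S.map (fun s => (b, s)))) := by
    apply foldl_add_filter
    intro x hx hpx
    rw [mem_foldl_add_iff, mem_foldl_add_iff]
    left; right
    simp only [List.mem_flatMap, List.mem_map] at hx ⊢
    obtain ⟨b, _, s, hs, rfl⟩ := hx
    simp only [Bool.not_eq_false', List.contains_eq_mem, decide_eq_true_eq] at hpx
    exact ⟨b, by simpa using hpx, s, hs, rfl⟩
  rw [h3]
  rw [show ∀ (u : PySem.Set (Int × Int)) (l : List (Int × Int)),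
        List.foldl PySem.Set.add u (List.foldl PySem.Set.add [] l)
          = List.foldl PySem.Set.add u l from
      fun u l => by rw [foldl_add_foldl]; rfl,
    show ∀ (u : PySem.Set (Int × Int)) (l : List (Int × Int)),
        List.foldl PySem.Set.add u (List.foldl PySem.Set.add [] l)
          = List.foldl PySem.Set.add u l from
      fun u l => by rw [foldl_add_foldl]; rfl,
    show ∀ (u : PySem.Set (Int × Int)) (l : List (Int × Int)),
        List.foldl PySem.Set.add u (List.foldl PySem.Set.add [] l)
          = List.foldl PySem.Set.add u l from
      fun u l => by rw [foldl_add_foldl]; rfl]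
  symm
  apply foldl_add_filter
  intro x hx hpx
  rw [mem_foldl_add_iff, mem_foldl_add_iff, mem_foldl_add_iff]
  simp only [List.mem_flatMap, List.mem_map] at hx
  obtain ⟨b, hb, t, ht, rfl⟩ := hx
  simp only [Bool.and_eq_false_iff, Bool.not_eq_false',
    List.contains_eq_mem, decide_eq_true_eq] at hpx
  rcases hpx with hA | hS
  · -- b ∈ A, so (b, t) ∈ A×T
    left; right
    simp only [List.mem_flatMap, List.mem_map]
    exact ⟨b, by simpa using hA, t, ht, rfl⟩
  · -- t ∈ S, so (b, t) ∈ B×S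
    right
    simp only [List.mem_flatMap, List.mem_map]
    exact ⟨b, hb, t, by simpa using hS, rfl⟩
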